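-- pv_equiv track=rewrite | github.com/JohnyGall/Maester | get_device_info.py | find_colon
-- ===== SOURCE A (Python) =====
-- def find_colon(line, index):
--     colons = list()
--     i = len(line) - 1
--
--     while i >= 0:
--         if line[i] == ':':
--             colons.append(line[i])
--         if len(colons) == index:
--             return i
--         i = i - 1
-- ===== SOURCE B (Python) =====
-- def find_colon(line, index):
--     if index < 1:
--         return None
--     positions = [i for i, c in enumerate(line) if c == ':']
--     return positions[-index] if index <= len(positions) else None
-- ===== Notes on version B (the rewrite author's own statement) =====
-- stated objective: simpler
-- what changed: Replaces the backward character-by-character counting scan with a precomputed forward list of all colon positions (a single C-level comprehension) and one negative-index selection.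
-- intended difference: When index == 0 and line is non-empty with a non-colon last character, A returns len(line)-1 (an accident of its length check running after a conditional append), while B returns None, the intended 'no such colon' answer. — e.g. on find_colon("a", 0): A returns some 0, B returns none
import Mathlib
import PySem

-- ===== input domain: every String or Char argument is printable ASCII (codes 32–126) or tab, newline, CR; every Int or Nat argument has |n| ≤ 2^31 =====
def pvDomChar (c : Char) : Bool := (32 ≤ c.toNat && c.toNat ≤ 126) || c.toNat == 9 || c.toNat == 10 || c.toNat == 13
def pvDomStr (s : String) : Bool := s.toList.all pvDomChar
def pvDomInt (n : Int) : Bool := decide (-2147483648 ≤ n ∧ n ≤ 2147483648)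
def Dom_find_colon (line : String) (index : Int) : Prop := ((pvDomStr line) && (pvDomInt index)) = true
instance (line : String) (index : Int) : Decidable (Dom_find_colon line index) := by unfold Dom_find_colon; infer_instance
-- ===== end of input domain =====

-- B replaces A's backward counting scan with a forward list of all colon positions and one
-- negative-index selection (objective: simpler); for index == 0 on a line whose last character
-- is not a colon, A accidentally returns len(line)-1 while B returns none (see D_find_colon).


-- ===== PORT A =====
-- while i >= 0 loop, carried state: the `colons` list; fuel n = i + 1
def findColonA_go (cs : List Char) (index : Int) : List Char → Nat → Option Int
  | _, 0 => none
  | colons, n+1 =>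
    let colons' := if cs.getD n ' ' == ':' then colons ++ [cs.getD n ' '] else colons
    if (colons'.length : Int) = index then some (n : Int)
    else findColonA_go cs index colons' n

def find_colon (line : String) (index : Int) : Option Int :=
  findColonA_go line.toList index [] line.toList.length

-- ===== PORT B =====
def find_colon_alt (line : String) (index : Int) : Option Int :=
  if index < 1 then none
  else
    let positions : List Int :=
      ((line.toList.zipIdx).filter (fun p => p.1 == ':')).map (fun p => (p.2 : Int))
    if index ≤ (positions.length : Int) then PySem.List.pyGet? positions (-index) else none

-- ===== PRECONDITION & SPEC =====
-- When index == 0 and line is non-empty with a non-colon last character, A returns len(line)-1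
-- (an accident of its length check running after a conditional append), while B returns None,
-- the intended "no such colon" answer.
def D_find_colon (line : String) (index : Int) : Prop :=
  index = 0 ∧ line.toList ≠ [] ∧ line.toList.getLast? ≠ some ':'
instance (line : String) (index : Int) : Decidable (D_find_colon line index) := by
  unfold D_find_colon; infer_instance

def Spec_find_colon (line : String) (index : Int) (out : Option Int) : Prop :=
  ¬ D_find_colon line index → out = find_colon_alt line index
instance (line : String) (index : Int) (out : Option Int) : Decidable (Spec_find_colon line index out) := by
  unfold Spec_find_colon; infer_instance

def pvDiffWitness_find_colon : String × Int := ("a", 0)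
def pvDiffWitnessOut_find_colon : (Option Int) × (Option Int) := (some 0, none)

-- ===== CLAIM (what is proved, stated in full; the proofs are below) =====
def Claim_unchanged_find_colon : Prop := ∀ (line : String) (index : Int), Dom_find_colon line index → Spec_find_colon line index (find_colon line index)
def Claim_changed_find_colon : Prop := Dom_find_colon (pvDiffWitness_find_colon.1) (pvDiffWitness_find_colon.2) ∧ D_find_colon (pvDiffWitness_find_colon.1) (pvDiffWitness_find_colon.2) ∧ find_colon (pvDiffWitness_find_colon.1) (pvDiffWitness_find_colon.2) = pvDiffWitnessOut_find_colon.1 ∧ find_colon_alt (pvDiffWitness_find_colon.1) (pvDiffWitness_find_colon.2) = pvDiffWitnessOut_find_colon.2 ∧ pvDiffWitnessOut_find_colon.1 ≠ pvDiffWitnessOut_find_colon.2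
def Claim_exact_find_colon : Prop := ∀ (line : String) (index : Int), Dom_find_colon line index → D_find_colon line index → find_colon line index ≠ find_colon_alt line index

-- ===== LEMMAS AND PROOFS =====

-- positions of ':' among the first n characters (left to right)
def colPos (cs : List Char) : Nat → List Nat
  | 0 => []
  | n+1 => colPos cs n ++ (if cs.getD n ' ' == ':' then [n] else [])

-- A's loop unfolded one step (definitional)
theorem goA_step (cs : List Char) (index : Int) (colons : List Char) (n : Nat) :
    findColonA_go cs index colons (n+1) =
      (let colons' := if cs.getD n ' ' == ':' then colons ++ [cs.getD n ' '] else colons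
       if (colons'.length : Int) = index then some (n : Int)
       else findColonA_go cs index colons' n) := rfl

theorem colPos_succ (cs : List Char) (n : Nat) :
    colPos cs (n+1) = colPos cs n ++ (if cs.getD n ' ' == ':' then [n] else []) := rfl

-- A's loop never returns once the carried list is already longer than index
theorem goA_none (cs : List Char) (index : Int) :
    ∀ (n : Nat) (colons : List Char), index < (colons.length : Int) →
      findColonA_go cs index colons n = none := by
  intro n
  induction n with
  | zero => intro colons _; rfl
  | succ n ih =>
    intro colons h
    rw [goA_step]
    cases hc : (cs.getD n ' ' == ':') <;> simp only [hc, if_true, if_false, Bool.false_eq_true]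
    · rw [if_neg (by omega)]
      exact ih _ h
    · rw [if_neg (by simp only [List.length_append, List.length_cons, List.length_nil]; push_cast; omega)]
      exact ih _ (by simp only [List.length_append, List.length_cons, List.length_nil]; push_cast; omega)

-- characterisation of A's loop for index strictly above the carried count
theorem goA_main (cs : List Char) (index : Int) :
    ∀ (n : Nat) (colons : List Char), 1 ≤ index - (colons.length : Int) →
      findColonA_go cs index colons n =
        (if index - (colons.length : Int) ≤ ((colPos cs n).length : Int)
         then some (((colPos cs n).reverse.getD ((index - colons.length).toNat - 1) 0 : Nat) : Int)
         else none) := by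
  intro n
  induction n with
  | zero =>
    intro colons h
    simp only [colPos, List.length_nil]
    rw [if_neg (by omega)]
    rfl
  | succ n ih =>
    intro colons h
    rw [goA_step, colPos_succ]
    cases hc : (cs.getD n ' ' == ':') <;>
      simp only [hc, if_true, if_false, Bool.false_eq_true, List.append_nil]
    · -- not a colon: nothing changes
      rw [if_neg (by omega)]
      exact ih _ h
    · -- colon at position n
      simp only [List.length_append, List.length_cons, List.length_nil, List.reverse_append,
        List.reverse_cons, List.reverse_nil, List.nil_append, List.cons_append]
      by_cases h1 : index - (colons.length : Int) = 1
      · rw [if_pos (by push_cast; omega)]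
        rw [if_pos (by push_cast; omega)]
        have hk : (index - (colons.length : Int)).toNat - 1 = 0 := by omega
        rw [hk]
        rfl
      · rw [if_neg (by push_cast; omega)]
        rw [ih _ (by simp only [List.length_append, List.length_cons, List.length_nil]; push_cast; omega)]
        have hc1 : ((colons ++ [cs.getD n ' ']).length : Int) = (colons.length : Int) + 1 := by
          simp
        rw [hc1]
        by_cases h2 : index - ((colons.length : Int) + 1) ≤ ((colPos cs n).length : Int)
        · rw [if_pos h2, if_pos (by push_cast at h2 ⊢; omega)]
          have hgt : (index - (colons.length : Int)).toNat - 1 =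
              ((index - ((colons.length : Int) + 1)).toNat - 1) + 1 := by omega
          rw [hgt, List.getD_cons_succ]
        · rw [if_neg h2, if_neg (by push_cast at h2 ⊢; omega)]

-- B's forward position list equals colPos (reverse induction on the string)
theorem colPos_append (cs : List Char) (c : Char) :
    ∀ n, n ≤ cs.length → colPos (cs ++ [c]) n = colPos cs n := by
  intro n
  induction n with
  | zero => intro _; rfl
  | succ n ih =>
    intro h
    have hg : (cs ++ [c]).getD n ' ' = cs.getD n ' ' := by
      simp [List.getD, List.getElem?_append_left (by omega : n < cs.length)]
    rw [colPos_succ, colPos_succ, hg, ih (by omega)]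

theorem positions_eq_colPos (cs : List Char) :
    ((cs.zipIdx.filter (fun p => p.1 == ':')).map (fun p => (p.2 : Int))) =
      List.map (fun n : Nat => (n : Int)) (colPos cs cs.length) := by
  induction cs using List.reverseRecOn with
  | nil => rfl
  | append_singleton cs c ih =>
    rw [List.zipIdx_append, List.zipIdx_singleton]
    rw [show (cs ++ [c]).length = cs.length + 1 from by simp]
    have hg : (cs ++ [c]).getD cs.length ' ' = c := by
      simp [List.getD]
    rw [colPos_succ, hg, colPos_append cs c cs.length (le_refl _)]
    cases hc : (c == ':') <;> simp [hc, ih]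

-- D_: A returns some (len - 1), B returns none
theorem find_colon_on_D (line : String) (h : D_find_colon line 0) :
    find_colon line 0 = some ((line.toList.length : Int) - 1) := by
  obtain ⟨-, hne, hlast⟩ := h
  unfold find_colon
  obtain ⟨n, hn⟩ : ∃ n, line.toList.length = n + 1 := by
    cases hlen : line.toList.length with
    | zero => exact absurd (List.eq_nil_of_length_eq_zero hlen) hne
    | succ n => exact ⟨n, rfl⟩
  rw [hn]
  have hlast' : line.toList.getD n ' ' ≠ ':' := by
    intro hcontra
    apply hlast
    rw [List.getLast?_eq_getElem?, hn]
    simp only [Nat.add_sub_cancel]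
    rw [← hcontra]
    simp [List.getD, List.getElem?_eq_getElem (by omega : n < line.toList.length)]
  have hcb : (line.toList.getD n ' ' == ':') = false := by simpa using hlast'
  rw [goA_step]
  simp only [hcb, if_false, Bool.false_eq_true]
  rw [if_pos (by simp)]
  simp

theorem find_colon_alt_nonpos (line : String) (index : Int) (h : index < 1) :
    find_colon_alt line index = none := by
  simp [find_colon_alt, h]

-- A = B for index ≥ 1
theorem main_pos (line : String) (index : Int) (h : 1 ≤ index) :
    find_colon line index = find_colon_alt line index := by
  unfold find_colon find_colon_alt
  rw [if_neg (by omega)]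
  rw [goA_main line.toList index line.toList.length [] (by simpa using h)]
  rw [positions_eq_colPos line.toList]
  simp only [List.length_nil, Nat.cast_zero, Int.sub_zero, List.length_map]
  set P := colPos line.toList line.toList.length with hP
  by_cases hle : index ≤ (P.length : Int)
  · rw [if_pos hle, if_pos hle]
    have h1 : (1 : Nat) ≤ index.toNat := by omega
    have h2 : index.toNat ≤ P.length := by omega
    rw [show -index = -((index.toNat : Nat) : Int) by omega]
    rw [PySem.List.pyGet?_neg_natCast (List.map (fun n : Nat => (n : Int)) P) index.toNat
      (by omega) (by simp only [List.length_map]; omega)]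
    rw [List.length_map]
    rw [List.getElem?_map]
    rw [List.getElem?_eq_getElem (by omega : P.length - index.toNat < P.length)]
    have hb : index.toNat - 1 < P.reverse.length := by simp; omega
    rw [List.getD_eq_getElem _ _ hb]
    rw [List.getElem_reverse]
    have hidx : P.length - 1 - (index.toNat - 1) = P.length - index.toNat := by omega
    simp only [Option.map_some, hidx]
  · rw [if_neg hle, if_neg hle]

-- ===== VERDICT (by name: the statement is the Claim_ definition above) =====
theorem find_colon_spec : Claim_unchanged_find_colon := by
  intro line index _ hD
  by_cases h1 : 1 ≤ index
  · exact main_pos line index h1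
  · rw [find_colon_alt_nonpos line index (by omega)]
    by_cases h0 : index = 0
    · subst h0
      -- line empty or last char is ':'
      by_cases hne : line.toList = []
      · unfold find_colon
        rw [hne]
        rfl
      · have hlast : line.toList.getLast? = some ':' := by
          by_contra hcontra
          exact hD ⟨rfl, hne, hcontra⟩
        obtain ⟨n, hn⟩ : ∃ n, line.toList.length = n + 1 := by
          cases hlen : line.toList.length with
          | zero => exact absurd (List.eq_nil_of_length_eq_zero hlen) hne
          | succ n => exact ⟨n, rfl⟩
        have hc : line.toList.getD n ' ' = ':' := by
          rw [List.getLast?_eq_getElem?] at hlast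
          simp [List.getD, hn] at hlast ⊢
          simpa [hn] using hlast
        unfold find_colon
        rw [hn]
        have hcb : (line.toList.getD n ' ' == ':') = true := by simpa using hc
        simp only [findColonA_go, hcb, if_true]
        rw [if_neg (by simp)]
        exact goA_none _ _ _ _ (by simp)
    · exact goA_none _ _ _ _ (by simp; omega)

theorem find_colon_changed : Claim_changed_find_colon := by
  unfold Claim_changed_find_colon; decide

theorem find_colon_tight : Claim_exact_find_colon := by
  intro line index _ hD
  have h0 := hD.1
  subst h0
  rw [find_colon_on_D line hD, find_colon_alt_nonpos line 0 (by omega)]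
  simp
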